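-- pv_equiv track=rewrite | github.com/Vinhdev04/PhamCongVinh_2280603703 | LAB-02/ex01/cipher/playfair/playfair_cipher.py | _clean_decrypted_text
-- ===== SOURCE A (Python) =====
-- def _clean_decrypted_text(text):
--     cleaned = ""
--     i = 0
--     while i < len(text):
--         cleaned += text[i]
--         if i + 2 < len(text) and text[i] == text[i + 2] and text[i + 1] == 'X':
--             i += 2
--         else:
--             i += 1
--     if cleaned.endswith('X'):
--         cleaned = cleaned[:-1]
--     return cleaned
-- ===== SOURCE B (Python) =====
-- def _clean_decrypted_text(text):
--     # single forward pass with a one-character lookback: an 'X' is held pending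
--     # and dropped when the next character repeats the character before it
--     out = []
--     pending = False
--     for c in text:
--         if pending:
--             pending = False
--             if c == out[-1]:
--                 out.append(c)
--                 continue
--             out.append('X')
--         if c == 'X' and out:
--             pending = True
--         else:
--             out.append(c)
--     if pending:
--         return ''.join(out)
--     if out and out[-1] == 'X':
--         out.pop()
--     return ''.join(out)
-- ===== Notes on version B (the rewrite author's own statement) =====
-- stated objective: faster
-- what changed: Replaces the index-jumping while-loop with its quadratic string concatenation (cleaned += ch) by a single left-to-right pass that appends to a list and joins once, holding each candidate pad character pending and resolving it by one-character lookback instead of lookahead at i+1/i+2.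
import Mathlib
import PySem

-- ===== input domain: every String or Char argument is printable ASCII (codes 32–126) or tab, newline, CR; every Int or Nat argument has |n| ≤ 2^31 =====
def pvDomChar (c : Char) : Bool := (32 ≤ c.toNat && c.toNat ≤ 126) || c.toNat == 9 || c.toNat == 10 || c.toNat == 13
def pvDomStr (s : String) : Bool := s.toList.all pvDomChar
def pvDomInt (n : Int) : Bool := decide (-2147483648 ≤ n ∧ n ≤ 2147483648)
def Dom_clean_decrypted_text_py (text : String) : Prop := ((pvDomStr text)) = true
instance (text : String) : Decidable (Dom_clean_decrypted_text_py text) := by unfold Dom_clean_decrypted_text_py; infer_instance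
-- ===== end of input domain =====

-- B replaces A's index-jumping lookahead loop (quadratic string concatenation) by one list-building pass with a pending lookback; measured faster in a timing run.

-- ===== PORT A =====
-- the while loop over the index i; Python's text[i] is only read with 0 ≤ i < len,
-- so the guarded getElem on the character list is exact
def pvALoop (l : List Char) (i : Nat) (cleaned : List Char) : List Char :=
  if h : i < l.length then
    let cleaned := cleaned ++ [l[i]]
    if i + 2 < l.length ∧ l[i + 2]? = some l[i] ∧ l[i + 1]? = some 'X' then
      pvALoop l (i + 2) cleaned
    else
      pvALoop l (i + 1) cleaned
  else cleaned
termination_by l.length - i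

def clean_decrypted_text_py (text : String) : String :=
  let cleaned := pvALoop text.toList 0 []
  -- if cleaned.endswith('X'): cleaned = cleaned[:-1]
  if cleaned.getLast? = some 'X' then String.mk cleaned.dropLast else String.mk cleaned

-- ===== PORT B =====
-- one step of B's for-loop: state = (out, pending)
def pvBStep (s : List Char × Bool) (c : Char) : List Char × Bool :=
  if s.2 then
    if s.1.getLast? = some c then (s.1 ++ [c], false)
    else
      let out := s.1 ++ ['X']
      if c = 'X' ∧ out ≠ [] then (out, true) else (out ++ [c], false)
  else if c = 'X' ∧ s.1 ≠ [] then (s.1, true) else (s.1 ++ [c], false)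

def clean_decrypted_text_py_alt (text : String) : String :=
  let st := text.toList.foldl pvBStep ([], false)
  if st.2 then String.mk st.1
  else if st.1.getLast? = some 'X' then String.mk st.1.dropLast else String.mk st.1

-- ===== PRECONDITION & SPEC =====
def Spec_clean_decrypted_text_py (text : String) (out : String) : Prop := out = clean_decrypted_text_py_alt text
instance (text : String) (out : String) : Decidable (Spec_clean_decrypted_text_py text out) := by unfold Spec_clean_decrypted_text_py; infer_instance

-- ===== CLAIM (what is proved, stated in full; the proofs are below) =====
def Claim_equal_clean_decrypted_text_py : Prop := ∀ (text : String), Dom_clean_decrypted_text_py text → Spec_clean_decrypted_text_py text (clean_decrypted_text_py text)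

-- ===== LEMMAS AND PROOFS =====

-- the common skeleton: emit the anchor, drop a following 'X' when the char after it repeats the anchor
def pvF : List Char → List Char
  | [] => []
  | c :: x :: c2 :: r2 =>
    if x = 'X' ∧ c2 = c then c :: pvF (c2 :: r2) else c :: pvF (x :: c2 :: r2)
  | c :: rest => c :: pvF rest
termination_by l => l.length

-- B's fold after the first emitted char, parametrised by the last emitted char a:
-- returns (suffix appended to out, final pending flag)
def pvK (a : Char) : List Char → List Char × Bool
  | [] => ([], false)
  | c :: r =>
    if c = 'X' then
      match r with
      | [] => ([], true)
      | c2 :: r2 =>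
        if c2 = a then
          let p := pvK a r2; (c2 :: p.1, p.2)
        else
          let p := pvK 'X' (c2 :: r2); ('X' :: p.1, p.2)
    else
      let p := pvK c r; (c :: p.1, p.2)
termination_by l => l.length

theorem pvALoop_eq (l : List Char) : ∀ n i cleaned, l.length - i = n →
    pvALoop l i cleaned = cleaned ++ pvF (l.drop i) := by
  intro n
  induction n using Nat.strong_induction_on with
  | _ n ih =>
    intro i cleaned hn
    rw [pvALoop]
    by_cases h : i < l.length
    · simp only [h, dif_pos]
      have hdrop : l.drop i = l[i] :: l.drop (i + 1) := List.drop_eq_getElem_cons h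
      by_cases hc : i + 2 < l.length ∧ l[i + 2]? = some l[i] ∧ l[i + 1]? = some 'X'
      · simp only [hc]
        obtain ⟨h2, he, hx⟩ := hc
        have h1 : i + 1 < l.length := by omega
        have hdrop1 : l.drop (i + 1) = l[i + 1] :: l.drop (i + 2) := List.drop_eq_getElem_cons h1
        have hdrop2 : l.drop (i + 2) = l[i + 2] :: l.drop (i + 3) := List.drop_eq_getElem_cons h2
        have hxe : l[i + 1] = 'X' := by
          have := List.getElem?_eq_getElem h1; rw [this] at hx; exact Option.some.inj hx
        have hee : l[i + 2] = l[i] := by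
          have := List.getElem?_eq_getElem h2; rw [this] at he; exact Option.some.inj he
        rw [ih (l.length - (i + 2)) (by omega) (i + 2) _ rfl]
        rw [hdrop, hdrop1, hdrop2, pvF]
        simp [hxe, hee]
      · simp only [hc, if_neg, not_false_iff]
        rw [ih (l.length - (i + 1)) (by omega) (i + 1) _ rfl]
        rw [hdrop]
        rcases hd1 : l.drop (i + 1) with _ | ⟨x, tl⟩
        · simp [pvF]
        · rcases hd2 : tl with _ | ⟨c2, r2⟩
          · simp [pvF]
          · subst hd2
            -- show the jump condition is false in pvF's terms
            have h1 : i + 1 < l.length := by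
              by_contra hle
              have : l.drop (i + 1) = [] := List.drop_eq_nil_of_le (by omega)
              simp [this] at hd1
            have hxeq : x = l[i + 1] := by
              have := List.drop_eq_getElem_cons h1 (l := l)
              rw [hd1] at this; exact (List.cons.inj this).1
            have h2 : i + 2 < l.length := by
              by_contra hle
              have hdl : (l.drop (i + 1)).length = l.length - (i + 1) := List.length_drop ..
              rw [hd1] at hdl; simp at hdl; omega
            have hc2eq : c2 = l[i + 2] := by
              have hdrop1 : l.drop (i + 1) = l[i + 1] :: l.drop (i + 2) := List.drop_eq_getElem_cons h1
              have hdrop2 : l.drop (i + 2) = l[i + 2] :: l.drop (i + 3) := List.drop_eq_getElem_cons h2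
              rw [hdrop2] at hdrop1; rw [hd1] at hdrop1
              exact (List.cons.inj (List.cons.inj hdrop1).2).1
            have hnc : ¬ (x = 'X' ∧ c2 = l[i]) := by
              intro ⟨ha, hb⟩
              apply hc
              refine ⟨h2, ?_, ?_⟩
              · rw [List.getElem?_eq_getElem h2, ← hc2eq, hb]
              · rw [List.getElem?_eq_getElem h1, ← hxeq, ha]
            rw [pvF]; simp [hnc]
    · simp only [h, dif_neg, not_false_iff]
      have : l.drop i = [] := List.drop_eq_nil_of_le (by omega)
      simp [this, pvF]

theorem pvBFold_eq : ∀ n (l : List Char), l.length = n → ∀ (out : List Char) a,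
    out.getLast? = some a →
    l.foldl pvBStep (out, false) = (out ++ (pvK a l).1, (pvK a l).2) := by
  intro n
  induction n using Nat.strong_induction_on with
  | _ n ih =>
    intro l hn out a hlast
    have hne : out ≠ [] := by intro h; rw [h] at hlast; simp at hlast
    match l with
    | [] => simp [pvK]
    | c :: r =>
      by_cases hcx : c = 'X'
      · subst hcx
        have hstep : pvBStep (out, false) 'X' = (out, true) := by
          simp [pvBStep, hne]
        match r with
        | [] =>
          simp only [List.foldl_cons, List.foldl_nil, hstep]
          simp [pvK]
        | c2 :: r2 =>
          by_cases hc2 : c2 = a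
          · have hstep2 : pvBStep (out, true) c2 = (out ++ [c2], false) := by
              simp [pvBStep, hlast, hc2]
            simp only [List.foldl_cons, hstep, hstep2]
            have hlast2 : (out ++ [c2]).getLast? = some a := by
              simp [List.getLast?_append, hc2]
            rw [ih r2.length (by simp at hn; omega) r2 rfl (out ++ [c2]) a hlast2]
            simp [pvK, hc2]
          · have hla : out.getLast? ≠ some c2 := by
              rw [hlast]; intro h; exact hc2 (Option.some.inj h).symm
            have hstep2 : pvBStep (out, true) c2 = pvBStep (out ++ ['X'], false) c2 := by
              simp only [pvBStep]
              simp [hla]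
            simp only [List.foldl_cons, hstep, hstep2]
            rw [show (List.foldl pvBStep (pvBStep (out ++ ['X'], false) c2) r2)
                  = List.foldl pvBStep (out ++ ['X'], false) (c2 :: r2) from rfl]
            have hlastX : (out ++ ['X']).getLast? = some 'X' := by simp [List.getLast?_append]
            rw [ih (c2 :: r2).length (by simp at hn ⊢; omega) (c2 :: r2) rfl (out ++ ['X']) 'X' hlastX]
            simp [pvK, hc2]
      · have hstep : pvBStep (out, false) c = (out ++ [c], false) := by
          simp [pvBStep, hcx]
        simp only [List.foldl_cons, hstep]
        have hlast2 : (out ++ [c]).getLast? = some c := by simp [List.getLast?_append]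
        rw [ih r.length (by simp at hn; omega) r rfl (out ++ [c]) c hlast2]
        conv_rhs => rw [pvK.eq_def]
        simp [hcx]

theorem pvF_eq_pvK : ∀ n (l : List Char), l.length = n → ∀ c,
    pvF (c :: l) = c :: (pvK c l).1 ++ (if (pvK c l).2 then ['X'] else []) := by
  intro n
  induction n using Nat.strong_induction_on with
  | _ n ih =>
    intro l hn c
    match l with
    | [] => simp [pvF, pvK]
    | x :: r =>
      by_cases hx : x = 'X'
      · subst hx
        match r with
        | [] => simp [pvF, pvK]
        | c2 :: r2 =>
          by_cases hc2 : c2 = c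
          · rw [pvF]
            simp only [hc2, and_true]
            subst hc2
            rw [ih r2.length (by simp at hn; omega) r2 rfl c2]
            simp [pvK]
          · rw [pvF]
            have : ¬ ('X' = 'X' ∧ c2 = c) := by simp [hc2]
            rw [if_neg this]
            rw [ih (c2 :: r2).length (by simp at hn ⊢; omega) (c2 :: r2) rfl 'X']
            simp [pvK, hc2]
      · have hF : pvF (c :: x :: r) = c :: pvF (x :: r) := by
          match r with
          | [] => simp [pvF]
          | c2 :: r2 => rw [pvF]; simp [hx]
        rw [hF, ih r.length (by simp at hn; omega) r rfl x]
        conv_rhs => rw [pvK.eq_def]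
        simp [hx]

theorem pv_core_eq (text : String) :
    clean_decrypted_text_py text = clean_decrypted_text_py_alt text := by
  unfold clean_decrypted_text_py clean_decrypted_text_py_alt
  have hA : pvALoop text.toList 0 [] = pvF text.toList := by
    have := pvALoop_eq text.toList (text.toList.length - 0) 0 [] rfl
    simpa using this
  match hl : text.toList with
  | [] => simp [hl, pvF] at hA ⊢; simp [hA]
  | c :: r =>
    have hstep : pvBStep ([], false) c = ([c], false) := by simp [pvBStep]
    have hfold : (c :: r).foldl pvBStep ([], false)
        = ([c] ++ (pvK c r).1, (pvK c r).2) := by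
      simp only [List.foldl_cons, hstep]
      exact pvBFold_eq r.length r rfl [c] c (by simp)
    have hFk := pvF_eq_pvK r.length r rfl c
    rw [hl] at hA
    rw [hA, hFk, hfold]
    by_cases hp : (pvK c r).2
    · simp only [hp, if_true]
      have h1 : ((c :: (pvK c r).1) ++ ['X']).getLast? = some 'X' := by
        rw [List.getLast?_append]; simp
      have h2 : ((c :: (pvK c r).1) ++ ['X']).dropLast = c :: (pvK c r).1 := by
        rw [List.dropLast_concat]
      rw [if_pos h1, h2]
      simp
    · simp [hp]

-- ===== VERDICT (by name: the statement is the Claim_ definition above) =====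
theorem clean_decrypted_text_py_spec : Claim_equal_clean_decrypted_text_py := by
  intro text _
  unfold Spec_clean_decrypted_text_py
  exact pv_core_eq text
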